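-- pv_equiv track=rewrite | github.com/SSSayon/CS61A-Fall-2020 | Project/cats/cats.py | fastest_words
-- ===== SOURCE A (Python) =====
-- def fastest_words(game):
--     """Return a list of lists of which words each player typed fastest.
--
--     Arguments:
--         game: a game data abstraction as returned by time_per_word.
--     Returns:
--         a list of lists containing which words each player typed fastest
--     """
--     player_indices = range(len(all_times(game)))  # contains an *index* for each player
--     word_indices = range(len(all_words(game)))    # contains an *index* for each word
--     # BEGIN PROBLEM 10
--     times = all_times(game)
--     fastest_times = [min([time[i] for time in times]) for i in range(len(all_words(game)))]
--     fastest_words_per_player = [[] for _ in range(len(all_times(game)))]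
--     for word_id in range(len(all_words(game))):
--         for player_id in range(len(all_times(game))):
--             if time(game, player_id, word_id) == fastest_times[word_id]:
--                 fastest_words_per_player[player_id].append(word_at(game, word_id))
--                 break
--     return fastest_words_per_player
--
-- def word_at(game, word_index):
--     """A selector function that gets the word with index word_index"""
--     assert 0 <= word_index < len(game[0]), "word_index out of range of words"
--     return game[0][word_index]
--
-- def all_words(game):
--     """A selector function for all the words in the game"""
--     return game[0]
--
-- def all_times(game):
--     """A selector function for all typing times for all players"""
--     return game[1]
--
-- def time(game, player_num, word_index):
--     """A selector function for the time it took player_num to type the word at word_index"""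
--     assert word_index < len(game[0]), "word_index out of range of words"
--     assert player_num < len(game[1]), "player_num out of range of players"
--     return game[1][player_num][word_index]
-- ===== SOURCE B (Python) =====
-- def fastest_words(game):
--     """Return a list of lists of which words each player typed fastest.
--
--     Player-major algorithm: sweep the players once, maintaining for every word
--     a running best (time, player) pair -- an earlier player is kept on ties
--     because the entry only changes on a strictly smaller time.  A final pass
--     groups each word under the player recorded in its best entry.
--     """
--     words, times = game
--     best = [None] * len(words)
--     for p, row in enumerate(times):
--         best = [cur if cur is not None and cur[0] <= row[i] else (row[i], p)
--                 for i, cur in enumerate(best)]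
--     result = [[] for _ in times]
--     for i, word in enumerate(words):
--         result[best[i][1]].append(word)
--     return result
-- ===== Notes on version B (the rewrite author's own statement) =====
-- stated objective: alternative
-- what changed: Replaces A's word-major min-then-rescan (precompute fastest_times, then for each word rescan players for the first equality match) by a player-major sweep that maintains a running per-word best (time, player) table updated on strictly smaller times, followed by a grouping pass over the words.
import Mathlib
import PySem

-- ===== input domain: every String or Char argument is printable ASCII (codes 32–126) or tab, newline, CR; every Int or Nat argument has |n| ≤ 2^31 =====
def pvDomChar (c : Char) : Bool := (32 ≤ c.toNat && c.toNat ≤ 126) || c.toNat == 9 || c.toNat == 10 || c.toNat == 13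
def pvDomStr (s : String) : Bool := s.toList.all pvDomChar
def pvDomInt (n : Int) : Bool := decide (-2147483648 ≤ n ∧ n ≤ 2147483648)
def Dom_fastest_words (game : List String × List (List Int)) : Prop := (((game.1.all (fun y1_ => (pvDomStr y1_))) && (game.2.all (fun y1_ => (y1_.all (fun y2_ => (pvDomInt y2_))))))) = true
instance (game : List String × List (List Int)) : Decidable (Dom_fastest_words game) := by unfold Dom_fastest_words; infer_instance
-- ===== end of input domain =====

-- B replaces A's word-major min-then-rescan by a player-major sweep maintaining a running
-- per-word best (time, player) table, plus a grouping pass (alternative decomposition, same cost).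
-- Neither program observably mutates its argument; equivalence is about the return value.

-- ===== PORT A =====
-- fastest_times = [min([time[i] for time in times]) for i in range(len(all_words(game)))]
-- (min of an empty list is ValueError in Python, modeled as `none`; such inputs are outside Pre_)
def fastestTimesA (words : List String) (times : List (List Int)) : List (Option Int) :=
  (PySem.List.pyRange 0 (words.length : Int)).map
    (fun i => PySem.List.min? (times.map (fun t => PySem.List.pyGetD t i 0)) (fun x => x))

-- literal port of A: per word_id, inner loop over player_id with break at first match
-- (the break-at-first-match loop is List.find?; list mutation `[player_id].append` is pySetD)
def fastest_words (game : List String × List (List Int)) : List (List String) :=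
  (PySem.List.pyRange 0 (game.1.length : Int)).foldl
    (fun acc word_id =>
      match List.find? (fun player_id =>
          some (PySem.List.pyGetD (PySem.List.pyGetD game.2 player_id []) word_id 0)
            == PySem.List.pyGetD (fastestTimesA game.1 game.2) word_id none)
        (PySem.List.pyRange 0 (game.2.length : Int)) with
      | some player_id =>
          PySem.List.pySetD acc player_id
            (PySem.List.pyGetD acc player_id [] ++ [PySem.List.pyGetD game.1 word_id ""])
      | none => acc)
    (game.2.map (fun _ => []))

-- ===== PORT B =====
-- one player's update of the running best table:
-- best = [cur if cur is not None and cur[0] <= row[i] else (row[i], p) for i, cur in enumerate(best)]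
def stepRowB (p : Int) (row : List Int) (best : List (Option (Int × Int))) :
    List (Option (Int × Int)) :=
  (PySem.List.enumerate best).map (fun ic =>
    match ic.2 with
    | some cur => if cur.1 ≤ PySem.List.pyGetD row ic.1 0 then some cur
                  else some (PySem.List.pyGetD row ic.1 0, p)
    | none => some (PySem.List.pyGetD row ic.1 0, p))

-- best = [None]*len(words); for p, row in enumerate(times): best = [... comprehension ...]
def bestTableB (words : List String) (times : List (List Int)) : List (Option (Int × Int)) :=
  (PySem.List.enumerate times).foldl (fun best pr => stepRowB pr.1 pr.2 best)
    (words.map (fun _ => none))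

-- literal port of B's grouping pass: for i, word in enumerate(words): result[best[i][1]].append(word)
-- (best[i] is None only outside Pre_, where Python raises; modeled by the identity branch)
def fastest_words_alt (game : List String × List (List Int)) : List (List String) :=
  (PySem.List.enumerate game.1).foldl
    (fun result iw =>
      match PySem.List.pyGetD (bestTableB game.1 game.2) iw.1 none with
      | some bst =>
          PySem.List.pySetD result bst.2 (PySem.List.pyGetD result bst.2 [] ++ [iw.2])
      | none => result)
    (game.2.map (fun _ => []))

-- ===== PRECONDITION & SPEC =====
-- Pre_ excludes exactly the inputs where Python A raises: min([]) (ValueError) when there is a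
-- word but no player, and times[player][word] (IndexError) when some player's row is shorter
-- than the word list.
def Pre_fastest_words (game : List String × List (List Int)) : Prop :=
  (game.1 ≠ [] → game.2 ≠ []) ∧ ∀ row ∈ game.2, game.1.length ≤ row.length
instance (game : List String × List (List Int)) : Decidable (Pre_fastest_words game) := by
  unfold Pre_fastest_words; infer_instance

def pvWitness_fastest_words : (List String × List (List Int)) := (["a", "b"], [[1, 5], [4, 2]])

def Spec_fastest_words (game : List String × List (List Int)) (out : List (List String)) : Prop := out = fastest_words_alt game
instance (game : List String × List (List Int)) (out : List (List String)) : Decidable (Spec_fastest_words game out) := by unfold Spec_fastest_words; infer_instance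

-- ===== CLAIM (what is proved, stated in full; the proofs are below) =====
def Claim_equal_fastest_words : Prop := ∀ (game : List String × List (List Int)), Dom_fastest_words game → Pre_fastest_words game → Spec_fastest_words game (fastest_words game)

-- ===== LEMMAS AND PROOFS =====

-- proof-side abbreviation: the per-word cell update hidden inside stepRowB's comprehension
def stepCell (i : Int) (acc : Option (Int × Int)) (pr : Int × List Int) : Option (Int × Int) :=
  match acc with
  | some cur => if cur.1 ≤ PySem.List.pyGetD pr.2 i 0 then some cur
                else some (PySem.List.pyGetD pr.2 i 0, pr.1)
  | none => some (PySem.List.pyGetD pr.2 i 0, pr.1)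

-- proof-side abbreviation: first-argmin-wins fold (strict '<' keeps the earlier index)
def pyArgminFold (f : Int → Int) (idxs : List Int) : Option Int :=
  match idxs with
  | [] => none
  | p :: ps => some (ps.foldl (fun b q => if f q < f b then q else b) p)

-- find? over range n, characterized
theorem find?_range_char {q : Nat → Bool} {n j : Nat}
    (h : List.find? q (List.range n) = some j) :
    j < n ∧ q j = true ∧ ∀ k < j, ¬ q k = true := by
  rcases List.find?_eq_some_iff_append.1 h with ⟨hq, as, bs, hsplit, hfail⟩
  have hjlen : as.length < n := by
    have := congrArg List.length hsplit
    simp at this; omega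
  have hj : j = as.length := by
    have h1 : (List.range n)[as.length]? = some as.length := by
      simp [hjlen]
    rw [hsplit] at h1
    rw [List.getElem?_append_right (le_refl as.length)] at h1
    simp at h1
    omega
  have has : as = List.range j := by
    have h2 := congrArg (List.take as.length) hsplit
    rw [List.take_left] at h2
    rw [List.take_range] at h2
    have h3 : min as.length n = as.length := by omega
    rw [h3] at h2
    rw [← h2, hj]
  subst hj
  refine ⟨hjlen, hq, ?_⟩
  intro k hk hqk
  have : k ∈ as := by rw [has]; simpa using hk
  exact absurd hqk (by simpa using hfail k this)

-- argmin fold invariant over range'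
theorem argmin_range'_char (v : Nat → Int) :
    ∀ (len a b : Nat), b < a → (∀ k < a, v b ≤ v k) → (∀ k < b, v b < v k) →
      (((List.range' a len).foldl (fun b q => if v q < v b then q else b) b) < a + len ∧
       (∀ k < a + len, v ((List.range' a len).foldl (fun b q => if v q < v b then q else b) b) ≤ v k) ∧
       (∀ k < (List.range' a len).foldl (fun b q => if v q < v b then q else b) b,
          v ((List.range' a len).foldl (fun b q => if v q < v b then q else b) b) < v k)) := by
  intro len
  induction len with
  | zero => intro a b h1 h2 h3; simpa using ⟨by omega, fun k hk => h2 k (by omega), h3⟩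
  | succ m ih =>
    intro a b h1 h2 h3
    rw [List.range'_succ, List.foldl_cons]
    by_cases hcase : v a < v b
    · simp only [if_pos hcase]
      have := ih (a + 1) a (by omega)
        (fun k hk => by rcases Nat.lt_succ_iff_lt_or_eq.1 hk with h | h
                        · exact le_of_lt (lt_of_lt_of_le hcase (h2 k h))
                        · subst h; exact le_refl _)
        (fun k hk => lt_of_lt_of_le hcase (h2 k hk))
      refine ⟨by omega, fun k hk => this.2.1 k (by omega), this.2.2⟩
    · simp only [if_neg hcase]
      have := ih (a + 1) b (by omega)
        (fun k hk => by rcases Nat.lt_succ_iff_lt_or_eq.1 hk with h | h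
                        · exact h2 k h
                        · subst h; exact le_of_not_gt hcase)
        h3
      refine ⟨by omega, fun k hk => this.2.1 k (by omega), this.2.2⟩

-- casting a Nat argmin fold to the Int fold the ports run
theorem foldl_argmin_cast (vI : Int → Int) (vN : Nat → Int) (hv : ∀ k : Nat, vI (k : Int) = vN k) :
    ∀ (l : List Nat) (b : Nat),
      (l.map (fun (k : Nat) => (k : Int))).foldl (fun b q => if vI q < vI b then q else b) (b : Int) =
        ((l.foldl (fun b q => if vN q < vN b then q else b) b : Nat) : Int) := by
  intro l
  induction l with
  | nil => intro b; simp
  | cons x xs ih =>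
    intro b
    rw [List.map_cons, List.foldl_cons, List.foldl_cons, hv, hv]
    by_cases h : vN x < vN b
    · rw [if_pos h, if_pos h]; exact ih x
    · rw [if_neg h, if_neg h]; exact ih b

-- A's first player whose time equals the min = argmin with strict '<'
theorem core (times : List (List Int)) (i : Int) :
    List.find? (fun p =>
        some (PySem.List.pyGetD (PySem.List.pyGetD times p []) i 0)
          == PySem.List.min? (times.map (fun t => PySem.List.pyGetD t i 0)) (fun x => x))
      (PySem.List.pyRange 0 (times.length : Int))
    = pyArgminFold (fun p => PySem.List.pyGetD (PySem.List.pyGetD times p []) i 0)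
        (PySem.List.pyRange 0 (times.length : Int)) := by
  cases htimes : times with
  | nil => simp [pyArgminFold]
  | cons r rest =>
  rw [← htimes]
  have hne : times ≠ [] := by rw [htimes]; simp
  set vs := times.map (fun t => PySem.List.pyGetD t i 0) with hvs
  set vI : Int → Int := fun p => PySem.List.pyGetD (PySem.List.pyGetD times p []) i 0 with hvI
  set vN : Nat → Int := fun k => vs.getD k 0 with hvN
  have hlenvs : vs.length = times.length := by rw [hvs]; simp
  have hv : ∀ k : Nat, vI (k : Int) = vN k := by
    intro k
    by_cases hk : k < times.length
    · show PySem.List.pyGetD (PySem.List.pyGetD times (k : Int) []) i 0 = vs.getD k 0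
      simp only [PySem.List.pyGetD_natCast]
      rw [List.getD_eq_getElem _ _ hk, List.getD_eq_getElem _ _ (by omega : k < vs.length)]
      simp [hvs]
    · show PySem.List.pyGetD (PySem.List.pyGetD times (k : Int) []) i 0 = vs.getD k 0
      simp only [PySem.List.pyGetD_natCast]
      rw [List.getD_eq_default _ _ (by omega), List.getD_eq_default _ _ (by omega)]
      simp [PySem.List.pyGetD, PySem.List.pyGet?]
  cases hmin : PySem.List.min? vs (fun x => x) with
  | none =>
    rw [PySem.List.min?_eq_none_iff] at hmin
    rw [hvs] at hmin
    simp [htimes] at hmin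
  | some m =>
  have hm_min : ∀ y ∈ vs, m ≤ y := by
    have := PySem.List.min?_isMin hmin
    simpa using this
  have hm_le : ∀ k < times.length, m ≤ vN k := by
    intro k hk
    have : vN k = vs[k]'(by omega) := by
      show vs.getD k 0 = _
      exact List.getD_eq_getElem _ _ (by omega)
    rw [this]
    exact hm_min _ (List.getElem_mem _)
  have hme : ∃ jm, jm < times.length ∧ vN jm = m := by
    have hmem : m ∈ vs := PySem.List.min?_mem hmin
    rcases List.mem_iff_getElem.1 hmem with ⟨jm, hjm, hjme⟩
    refine ⟨jm, by omega, ?_⟩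
    show vs.getD jm 0 = m
    rw [List.getD_eq_getElem _ _ hjm]
    exact hjme
  -- argmin side
  have hn : times.length = rest.length + 1 := by rw [htimes]; simp
  rw [PySem.List.pyRange_zero]
  rw [Int.toNat_natCast]
  rw [hn, List.range_eq_range', List.range'_succ]
  rw [List.map_cons]
  set r := (List.range' 1 rest.length).foldl (fun b q => if vN q < vN b then q else b) 0 with hr
  have hBchar := argmin_range'_char vN rest.length 1 0 (by omega)
    (fun k hk => by have hk0 : k = 0 := by omega
                    subst hk0; exact le_refl _)
    (fun k hk => by omega)
  rw [← hr] at hBchar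
  have hB : pyArgminFold vI ((0 : Nat) :: List.map (fun (k : Nat) => (k : Int)) (List.range' 1 rest.length)) = some (r : Int) := by
    show some _ = _
    rw [foldl_argmin_cast vI vN hv]
  have hrlt : r < times.length := by omega
  have hrmin : ∀ k < times.length, vN r ≤ vN k := by
    intro k hk
    exact hBchar.2.1 k (by omega)
  have hrm : vN r = m := by
    rcases hme with ⟨jm, hjm1, hjm2⟩
    exact le_antisymm (hjm2 ▸ hrmin jm hjm1) (hm_le r hrlt)
  -- find? side
  have hq : (fun (k : Nat) => (some (vI (k : Int)) == some m)) r = true := by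
    simp [hv, hrm]
  have hsome : (List.find? (fun (k : Nat) => (some (vI (k : Int)) == some m)) (List.range times.length)).isSome := by
    rw [List.find?_isSome]
    exact ⟨r, List.mem_range.2 hrlt, hq⟩
  rcases Option.isSome_iff_exists.1 hsome with ⟨j, hfind⟩
  rcases find?_range_char hfind with ⟨hjlt, hqj, hjfirst⟩
  have hjm : vN j = m := by
    rw [← hv]
    simpa using hqj
  have hjr : j = r := by
    rcases Nat.lt_trichotomy j r with h | h | h
    · exfalso
      have h1 : vN r < vN j := hBchar.2.2 j h
      have h2 : vN j ≤ vN r := hjm ▸ hm_le r hrlt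
      omega
    · exact h
    · exfalso
      have h1 : ¬ (some (vI (r : Int)) == some m) = true := hjfirst r h
      rw [hv, hrm] at h1
      simp at h1
  have hA : List.find? (fun p => some (vI p) == some m) (List.map (fun (k : Nat) => (k : Int)) (List.range times.length)) = some (j : Int) := by
    rw [List.find?_map]
    have : ((fun p => some (vI p) == some m) ∘ fun (k : Nat) => (k : Int)) = (fun (k : Nat) => (some (vI (k : Int)) == some m)) := rfl
    rw [this, hfind]
    rfl
  rw [hn, List.range_eq_range', List.range'_succ] at hA
  rw [List.map_cons] at hA
  exact hA.trans (by rw [hjr]; exact hB.symm)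

-- B's keep-on-≤ cell fold tracks exactly the strict-'<' argmin fold together with its value
theorem keep_eq_argmin (i : Int) (rowOf : Int → List Int) :
    ∀ (l : List Int) (b : Int),
      l.foldl (fun acc k => stepCell i acc (k, rowOf k))
        (some (PySem.List.pyGetD (rowOf b) i 0, b))
      = some (PySem.List.pyGetD
                (rowOf (l.foldl (fun b q =>
                  if PySem.List.pyGetD (rowOf q) i 0 < PySem.List.pyGetD (rowOf b) i 0 then q else b) b)) i 0,
              l.foldl (fun b q =>
                  if PySem.List.pyGetD (rowOf q) i 0 < PySem.List.pyGetD (rowOf b) i 0 then q else b) b) := by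
  intro l
  induction l with
  | nil => intro b; rfl
  | cons k ks ih =>
    intro b
    rw [List.foldl_cons, List.foldl_cons]
    by_cases h : PySem.List.pyGetD (rowOf k) i 0 < PySem.List.pyGetD (rowOf b) i 0
    · rw [if_pos h]
      have hstep : stepCell i (some (PySem.List.pyGetD (rowOf b) i 0, b)) (k, rowOf k)
          = some (PySem.List.pyGetD (rowOf k) i 0, k) := by
        simp [stepCell, not_le.2 h]
      rw [hstep]; exact ih k
    · rw [if_neg h]
      have hstep : stepCell i (some (PySem.List.pyGetD (rowOf b) i 0, b)) (k, rowOf k)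
          = some (PySem.List.pyGetD (rowOf b) i 0, b) := by
        simp [stepCell, le_of_not_gt h]
      rw [hstep]; exact ih b

-- the per-word cell fold computes (value, index) of the first argmin
theorem foldl_stepCell_eq_pyArgmin (i : Int) (rowOf : Int → List Int) (idxs : List Int) :
    idxs.foldl (fun acc k => stepCell i acc (k, rowOf k)) none
    = (pyArgminFold (fun k => PySem.List.pyGetD (rowOf k) i 0) idxs).map
        (fun j => (PySem.List.pyGetD (rowOf j) i 0, j)) := by
  cases idxs with
  | nil => rfl
  | cons p ps =>
    rw [List.foldl_cons]
    have h1 : stepCell i none (p, rowOf p) = some (PySem.List.pyGetD (rowOf p) i 0, p) := by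
      simp [stepCell]
    rw [h1, keep_eq_argmin]
    rfl

-- one stepRowB preserves the table's length …
theorem length_stepRowB (p : Int) (row : List Int) (best : List (Option (Int × Int))) :
    (stepRowB p row best).length = best.length := by
  simp [stepRowB, PySem.List.length_enumerate]

-- … and acts cellwise
theorem getElem?_stepRowB (p : Int) (row : List Int) (best : List (Option (Int × Int)))
    (i : Nat) (hi : i < best.length) :
    (stepRowB p row best)[i]? = some (stepCell (i : Int) (best[i]'hi) (p, row)) := by
  have h1 : i < (stepRowB p row best).length := by rw [length_stepRowB]; exact hi
  rw [List.getElem?_eq_getElem h1]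
  simp [stepRowB, PySem.List.getElem_enumerate, stepCell]

-- … and is, cell by cell, the per-word cell fold
theorem getElem?_foldl_stepRowB (rows : List (Int × List Int)) :
    ∀ (best : List (Option (Int × Int))) (i : Nat) (hi : i < best.length),
      (rows.foldl (fun b pr => stepRowB pr.1 pr.2 b) best)[i]?
        = some (rows.foldl (fun acc pr => stepCell (i : Int) acc pr) (best[i]'hi)) := by
  induction rows with
  | nil =>
    intro best i hi
    rw [List.foldl_nil, List.foldl_nil, List.getElem?_eq_getElem hi]
  | cons r rs ih =>
    intro best i hi
    have hib : i < (stepRowB r.1 r.2 best).length := by rw [length_stepRowB]; exact hi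
    rw [List.foldl_cons, List.foldl_cons]
    rw [ih (stepRowB r.1 r.2 best) i hib]
    have h2 : (stepRowB r.1 r.2 best)[i]'hib = stepCell (i : Int) (best[i]'hi) (r.1, r.2) := by
      have h3 := getElem?_stepRowB r.1 r.2 best i hi
      rw [List.getElem?_eq_getElem hib] at h3
      exact Option.some.inj h3
    rw [h2]

-- the best table at a valid word index = (min value, first argmin player)
theorem bestTableB_get (words : List String) (times : List (List Int)) (k : Nat)
    (hk : k < words.length) :
    PySem.List.pyGetD (bestTableB words times) (k : Int) none
      = (pyArgminFold (fun p => PySem.List.pyGetD (PySem.List.pyGetD times p []) (k : Int) 0)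
          (PySem.List.pyRange 0 (times.length : Int))).map
          (fun j => (PySem.List.pyGetD (PySem.List.pyGetD times j []) (k : Int) 0, j)) := by
  unfold bestTableB
  have hk' : k < (words.map (fun (_ : String) => (none : Option (Int × Int)))).length := by
    simp [hk]
  rw [PySem.List.pyGetD_natCast]
  rw [List.getD_eq_getElem?_getD]
  rw [getElem?_foldl_stepRowB _ _ k hk']
  have hinit : (words.map (fun (_ : String) => (none : Option (Int × Int))))[k]'hk' = none := by
    simp
  rw [hinit, Option.getD_some]
  have henum : PySem.List.enumerate times = (PySem.List.pyRange 0 (PySem.List.len times) 1).map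
      (fun j => (j, PySem.List.pyGetD times j [])) := PySem.List.enumerate_eq_map_pyRange times []
  rw [henum, List.foldl_map]
  have hlen2 : PySem.List.len times = (times.length : Int) := by simp [PySem.List.len]
  rw [hlen2]
  exact foldl_stepCell_eq_pyArgmin (k : Int) (fun j => PySem.List.pyGetD times j []) _

-- the two ports agree on every input (even those outside Pre_)
theorem ports_eq (game : List String × List (List Int)) :
    fastest_words game = fastest_words_alt game := by
  unfold fastest_words fastest_words_alt
  rw [PySem.List.enumerate_eq_map_pyRange game.1 ""]
  have hlen : PySem.List.len game.1 = (game.1.length : Int) := by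
    simp [PySem.List.len]
  rw [hlen, List.foldl_map]
  apply PySem.List.foldl_congr_mem
  intro acc x hx
  have hx' := PySem.List.mem_pyRange_one.1 hx
  have hft : PySem.List.pyGetD (fastestTimesA game.1 game.2) x none
      = PySem.List.min? (game.2.map (fun t => PySem.List.pyGetD t x 0)) (fun y => y) := by
    unfold fastestTimesA
    exact PySem.List.pyGetD_map_pyRange_of_nonneg _ _ _ _ hx'.1 hx'.2
  rw [hft, core game.2 x]
  obtain ⟨k, hkx⟩ : ∃ k : Nat, x = (k : Int) := ⟨x.toNat, by omega⟩
  subst hkx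
  have hk : k < game.1.length := by exact_mod_cast hx'.2
  rw [bestTableB_get game.1 game.2 k hk]
  cases pyArgminFold (fun p => PySem.List.pyGetD (PySem.List.pyGetD game.2 p []) (k : Int) 0)
      (PySem.List.pyRange 0 (game.2.length : Int)) with
  | none => rfl
  | some j => rfl

-- ===== VERDICT (by name: the statement is the Claim_ definition above) =====
theorem fastest_words_spec : Claim_equal_fastest_words := by
  intro game _ _
  unfold Spec_fastest_words
  exact ports_eq game
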